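-- pv_equiv track=rewrite | github.com/Littlemowmow/pinterest-automation | backend/app/services/openai_vision.py | suggest_board
-- ===== SOURCE A (Python) =====
-- from typing import List
--
-- BOARD_CATEGORIES = [
--     "henna", "desi", "bridal", "thrifted",
--     "nails", "outfits", "floral", "neutral"
-- ]
--
-- def suggest_board(tags: List[str]) -> str:
--     """Suggest a board based on tags."""
--     # Priority order for board matching
--     for category in BOARD_CATEGORIES:
--         if category in tags:
--             return category
--
--     # Check for related terms
--     tag_set = set(tags)
--
--     if tag_set & {"mehndi", "henna design", "mehendi"}:
--         return "henna"
--     if tag_set & {"wedding", "bride", "bridal mehndi"}: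
--         return "bridal"
--     if tag_set & {"pakistani", "indian", "south asian", "desi fashion"}:
--         return "desi"
--     if tag_set & {"nail art", "manicure", "nails"}:
--         return "nails"
--     if tag_set & {"fashion", "style", "clothing", "outfit"}:
--         return "outfits"
--     if tag_set & {"flowers", "botanical", "floral"}:
--         return "floral"
--     if tag_set & {"vintage", "thrift", "secondhand"}:
--         return "thrifted"
--
--     return "neutral"
-- ===== SOURCE B (Python) =====
-- from typing import List
--
-- BOARD_CATEGORIES = [
--     "henna", "desi", "bridal", "thrifted",
--     "nails", "outfits", "floral", "neutral"
-- ]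
--
-- # the same rules, but inverted once into a keyword -> (priority, board) index,
-- # where priority is the index of the first rule mentioning the keyword
-- RULES = [(name, [name]) for name in BOARD_CATEGORIES] + [
--     ("henna", ["mehndi", "henna design", "mehendi"]),
--     ("bridal", ["wedding", "bride", "bridal mehndi"]),
--     ("desi", ["pakistani", "indian", "south asian", "desi fashion"]),
--     ("nails", ["nail art", "manicure", "nails"]),
--     ("outfits", ["fashion", "style", "clothing", "outfit"]),
--     ("floral", ["flowers", "botanical", "floral"]),
--     ("thrifted", ["vintage", "thrift", "secondhand"]),
-- ]
--
-- PRIORITY = {}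
-- for _i, (_board, _kws) in enumerate(RULES):
--     for _k in _kws:
--         if _k not in PRIORITY:
--             PRIORITY[_k] = (_i, _board)
--
-- def suggest_board(tags: List[str]) -> str:
--     """Suggest a board based on tags."""
--     best = None
--     for t in tags:
--         p = PRIORITY.get(t)
--         if p is not None and (best is None or p[0] < best[0]):
--             best = p
--     return best[1] if best is not None else "neutral"
-- ===== Notes on version B (the rewrite author's own statement) =====
-- stated objective: faster
-- what changed: Inverts the rule table once into a keyword->(priority, board) dict and replaces A's ordered rule scan (loop plus if-chain of set intersections) with a single pass over the tags keeping the minimum-priority match, so per call no rule set is scanned at all.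
import Mathlib
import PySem

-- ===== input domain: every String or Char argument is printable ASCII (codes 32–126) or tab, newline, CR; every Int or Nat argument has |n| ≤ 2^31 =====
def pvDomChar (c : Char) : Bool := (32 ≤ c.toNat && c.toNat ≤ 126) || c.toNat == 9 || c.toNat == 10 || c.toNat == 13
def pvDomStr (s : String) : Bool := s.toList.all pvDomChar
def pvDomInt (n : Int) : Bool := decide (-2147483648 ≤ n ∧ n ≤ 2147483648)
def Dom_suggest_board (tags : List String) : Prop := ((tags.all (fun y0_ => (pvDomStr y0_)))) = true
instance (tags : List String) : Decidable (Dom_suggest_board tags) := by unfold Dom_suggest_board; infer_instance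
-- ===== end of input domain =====

-- B inverts the rule table once into a keyword -> (priority, board) index and takes the minimum-priority match over the tags; return value only.


-- ===== PORT A =====
def BOARD_CATEGORIES : List String :=
  ["henna", "desi", "bridal", "thrifted", "nails", "outfits", "floral", "neutral"]

def suggest_board (tags : List String) : String :=
  match BOARD_CATEGORIES.find? (fun category => tags.contains category) with
  | some category => category
  | none =>
    let tag_set : PySem.Set String := PySem.Set.ofList tags
    if !(PySem.Set.inter tag_set ["mehndi", "henna design", "mehendi"]).isEmpty then "henna"
    else if !(PySem.Set.inter tag_set ["wedding", "bride", "bridal mehndi"]).isEmpty then "bridal"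
    else if !(PySem.Set.inter tag_set ["pakistani", "indian", "south asian", "desi fashion"]).isEmpty then "desi"
    else if !(PySem.Set.inter tag_set ["nail art", "manicure", "nails"]).isEmpty then "nails"
    else if !(PySem.Set.inter tag_set ["fashion", "style", "clothing", "outfit"]).isEmpty then "outfits"
    else if !(PySem.Set.inter tag_set ["flowers", "botanical", "floral"]).isEmpty then "floral"
    else if !(PySem.Set.inter tag_set ["vintage", "thrift", "secondhand"]).isEmpty then "thrifted"
    else "neutral"

-- ===== PORT B =====
-- Source B's RULES: the exact rules (BOARD_CATEGORIES order) followed by the related-term rules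
def pvRules : List (String × List String) :=
  (BOARD_CATEGORIES.map (fun name => (name, [name]))) ++
  [("henna", ["mehndi", "henna design", "mehendi"]),
   ("bridal", ["wedding", "bride", "bridal mehndi"]),
   ("desi", ["pakistani", "indian", "south asian", "desi fashion"]),
   ("nails", ["nail art", "manicure", "nails"]),
   ("outfits", ["fashion", "style", "clothing", "outfit"]),
   ("floral", ["flowers", "botanical", "floral"]),
   ("thrifted", ["vintage", "thrift", "secondhand"])]

-- Source B's module-level build of PRIORITY: keyword -> (index of first rule mentioning it, that rule's board)
def pvPRIORITY : PySem.Dict String (Int × String) :=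
  (PySem.List.enumerate pvRules 0).foldl
    (fun d ib => ib.2.2.foldl
      (fun d k => if d.contains k then d else d.insert k (ib.1, ib.2.1)) d)
    PySem.Dict.empty

-- the body of Source B's loop: keep the lower-priority match
def pvStep (best : Option (Int × String)) (t : String) : Option (Int × String) :=
  match pvPRIORITY.get? t with
  | none => best
  | some p =>
    match best with
    | none => some p
    | some b => if p.1 < b.1 then some p else some b

def suggest_board_alt (tags : List String) : String :=
  match tags.foldl pvStep none with
  | some b => b.2
  | none => "neutral"

-- ===== PRECONDITION & SPEC =====
def Spec_suggest_board (tags : List String) (out : String) : Prop := out = suggest_board_alt tags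
instance (tags : List String) (out : String) : Decidable (Spec_suggest_board tags out) := by unfold Spec_suggest_board; infer_instance

-- ===== CLAIM (what is proved, stated in full; the proofs are below) =====
def Claim_equal_suggest_board : Prop := ∀ (tags : List String), Dom_suggest_board tags → Spec_suggest_board tags (suggest_board tags)

-- ===== LEMMAS AND PROOFS =====
-- keyword list of rule j
def pvKws (j : Nat) : List String := (pvRules.getD j ("", [])).2

-- board of the rule at index i (15 and beyond: the fallback "neutral")
def pvBoardOf (i : Int) : String :=
  if i = 0 then "henna" else if i = 1 then "desi" else if i = 2 then "bridal"
  else if i = 3 then "thrifted" else if i = 4 then "nails" else if i = 5 then "outfits"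
  else if i = 6 then "floral" else if i = 7 then "neutral" else if i = 8 then "henna"
  else if i = 9 then "bridal" else if i = 10 then "desi" else if i = 11 then "nails"
  else if i = 12 then "outfits" else if i = 13 then "floral" else if i = 14 then "thrifted"
  else "neutral"

-- priority of a tag: index of the first rule mentioning it, 15 if none does
def pvPrio (t : String) : Int :=
  match pvPRIORITY.get? t with
  | some p => p.1
  | none => 15

-- rule j fires on tags
def pvHit (tags : List String) (j : Nat) : Bool := (pvKws j).any (fun k => tags.contains k)

-- the canonical valid accumulator holding priority i (none for the sentinel 15)
def pvToOpt (i : Int) : Option (Int × String) := if i < 15 then some (i, pvBoardOf i) else none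

-- minimum priority over the tags (15 if no tag matches any rule)
def pvM (tags : List String) : Int := tags.foldl (fun m t => min m (pvPrio t)) 15

-- A's two phases, abstracted over its fifteen boolean conditions (mirrors A's unfolded shape)
def pvChainA (c1 c2 c3 c4 c5 c6 c7 c8 k1 k2 k3 k4 k5 k6 k7 : Bool) : String :=
  match (match c1 with
    | true => some "henna"
    | false => match c2 with
    | true => some "desi"
    | false => match c3 with
    | true => some "bridal"
    | false => match c4 with
    | true => some "thrifted"
    | false => match c5 with
    | true => some "nails"
    | false => match c6 with
    | true => some "outfits"
    | false => match c7 with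
    | true => some "floral"
    | false => match c8 with
    | true => some "neutral"
    | false => none) with
  | some category => category
  | none =>
    if k1 then "henna" else if k2 then "bridal" else if k3 then "desi" else if k4 then "nails"
    else if k5 then "outfits" else if k6 then "floral" else if k7 then "thrifted" else "neutral"

-- a nonempty (set(tags) & kw) test is exactly "some keyword occurs in tags"
theorem pv_cond (tags kw : List String) :
    (!(PySem.Set.inter (PySem.Set.ofList tags) kw).isEmpty) = kw.any (fun k => tags.contains k) := by
  rw [Bool.eq_iff_iff]
  simp only [PySem.Set.inter, Bool.not_eq_eq_eq_not, Bool.not_true, List.isEmpty_eq_false_iff,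
    ne_eq, List.filter_eq_nil_iff, List.any_eq_true,
    List.contains_eq_mem, decide_eq_true_eq, PySem.Set.mem_ofList, PySem.Set.contains]
  push_neg
  constructor
  · rintro ⟨x, hx, hkw⟩; exact ⟨x, by simpa using hkw, hx⟩
  · rintro ⟨k, hk, ht⟩; exact ⟨k, ht, by simpa using hk⟩

-- every PRIORITY entry: index in range, board determined by the index, key mentioned by that rule
theorem pv_items_fact : ∀ e ∈ pvPRIORITY.items,
    0 ≤ e.2.1 ∧ e.2.1 < 15 ∧ e.2.2 = pvBoardOf e.2.1 ∧ e.1 ∈ pvKws e.2.1.toNat := by decide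

-- a keyword of rule j has priority at most j
theorem pv_F2 : ∀ j ∈ List.range 15, ∀ t ∈ pvKws j, pvPrio t ≤ (j : Int) := by decide

theorem pv_prio_bounds (t : String) : 0 ≤ pvPrio t ∧ pvPrio t ≤ 15 := by
  unfold pvPrio
  cases h : pvPRIORITY.get? t with
  | none => decide
  | some p =>
    have hfact := pv_items_fact _ (PySem.Dict.mem_items_of_get?_eq_some _ h)
    simp only [] at hfact
    show 0 ≤ p.1 ∧ p.1 ≤ 15
    omega

theorem pv_prio_mem (t : String) (h : pvPrio t < 15) : t ∈ pvKws (pvPrio t).toNat := by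
  unfold pvPrio at h ⊢
  cases hg : pvPRIORITY.get? t with
  | none => rw [hg] at h; exact absurd h (by decide)
  | some p =>
    have hf := pv_items_fact _ (PySem.Dict.mem_items_of_get?_eq_some _ hg)
    exact hf.2.2.2

theorem pv_step_eq (t : String) (i : Int) (h0 : 0 ≤ i) (h1 : i ≤ 15) :
    pvStep (pvToOpt i) t = pvToOpt (min i (pvPrio t)) := by
  unfold pvStep pvPrio pvToOpt
  cases hg : pvPRIORITY.get? t with
  | none =>
    have : min i 15 = i := by omega
    rw [this]
  | some p =>
    have hfact := pv_items_fact _ (PySem.Dict.mem_items_of_get?_eq_some _ hg)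
    simp only [] at hfact
    obtain ⟨hp0, hp1, hpb, -⟩ := hfact
    by_cases hi : i < 15
    · simp only [if_pos hi]
      by_cases hlt : p.1 < i
      · rw [if_pos hlt, if_pos (by omega : min i p.1 < 15), min_eq_right (by omega : p.1 ≤ i)]
        rw [← hpb]
      · rw [if_neg hlt, if_pos (by omega : min i p.1 < 15), min_eq_left (by omega : i ≤ p.1)]
    · simp only [if_neg hi]
      rw [if_pos (by omega : min i p.1 < 15), min_eq_right (by omega : p.1 ≤ i)]
      rw [← hpb]

theorem pv_fold_inv (tags : List String) : ∀ i : Int, 0 ≤ i → i ≤ 15 →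
    tags.foldl pvStep (pvToOpt i) = pvToOpt (tags.foldl (fun m t => min m (pvPrio t)) i) := by
  induction tags with
  | nil => intro i _ _; rfl
  | cons t rest ih =>
    intro i h0 h1
    have hb := pv_prio_bounds t
    simp only [List.foldl_cons]
    rw [pv_step_eq t i h0 h1]
    exact ih (min i (pvPrio t)) (by omega) (by omega)

theorem pv_foldmin_le_init (l : List String) : ∀ i : Int,
    l.foldl (fun m t => min m (pvPrio t)) i ≤ i := by
  induction l with
  | nil => intro i; simp
  | cons t rest ih =>
    intro i
    simp only [List.foldl_cons]
    have := ih (min i (pvPrio t))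
    omega

theorem pv_foldmin_le_mem (l : List String) : ∀ i : Int, ∀ t ∈ l,
    l.foldl (fun m t => min m (pvPrio t)) i ≤ pvPrio t := by
  induction l with
  | nil => intro i t ht; simp at ht
  | cons u rest ih =>
    intro i t ht
    simp only [List.foldl_cons]
    rcases List.mem_cons.mp ht with rfl | hmem
    · have := pv_foldmin_le_init rest (min i (pvPrio t)); omega
    · exact ih _ t hmem

theorem pv_foldmin_cases (l : List String) : ∀ i : Int,
    l.foldl (fun m t => min m (pvPrio t)) i = i ∨
      ∃ t ∈ l, l.foldl (fun m t => min m (pvPrio t)) i = pvPrio t := by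
  induction l with
  | nil => intro i; left; rfl
  | cons u rest ih =>
    intro i
    simp only [List.foldl_cons]
    rcases ih (min i (pvPrio u)) with h | ⟨t, ht, hEq⟩
    · by_cases hle : i ≤ pvPrio u
      · left; rw [h]; omega
      · right; exact ⟨u, List.mem_cons_self, by rw [h]; omega⟩
    · right; exact ⟨t, List.mem_cons_of_mem _ ht, hEq⟩

-- pvM equals the first firing rule index
theorem pv_M_eq (tags : List String) (j : Nat) (hj : j ≤ 15)
    (hf : ∀ k, k < j → pvHit tags k = false) (ht : j < 15 → pvHit tags j = true) :
    pvM tags = (j : Int) := by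
  have hub : pvM tags ≤ (j : Int) := by
    by_cases hj15 : j < 15
    · obtain ⟨w, hwk, hwt⟩ := List.any_eq_true.mp (ht hj15)
      have hwmem : w ∈ tags := by simpa using hwt
      have h1 : pvM tags ≤ pvPrio w := pv_foldmin_le_mem tags 15 w hwmem
      have h2 : pvPrio w ≤ (j : Int) := pv_F2 j (List.mem_range.mpr hj15) w hwk
      omega
    · have h15 : j = 15 := by omega
      have := pv_foldmin_le_init tags 15
      unfold pvM; omega
  have hlb : (j : Int) ≤ pvM tags := by
    by_contra hlt
    push_neg at hlt
    rcases pv_foldmin_cases tags 15 with h | ⟨t, htags, hEq⟩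
    · unfold pvM at hlt; rw [h] at hlt; omega
    · have hMt : pvM tags = pvPrio t := hEq
      have hlt15 : pvPrio t < 15 := by omega
      have hmemk : t ∈ pvKws (pvPrio t).toNat := pv_prio_mem t hlt15
      have hhit : pvHit tags (pvPrio t).toNat = true :=
        List.any_eq_true.mpr ⟨t, hmemk, by simpa using htags⟩
      have h0 : 0 ≤ pvPrio t := (pv_prio_bounds t).1
      have hklt : (pvPrio t).toNat < j := by omega
      rw [hf _ hklt] at hhit
      exact Bool.false_ne_true hhit
  omega

-- B computes pvBoardOf (pvM tags)
theorem pv_B_eq (tags : List String) : suggest_board_alt tags = pvBoardOf (pvM tags) := by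
  unfold suggest_board_alt
  rw [show (none : Option (Int × String)) = pvToOpt 15 from rfl,
    pv_fold_inv tags 15 (by norm_num) (le_refl _)]
  have hM : tags.foldl (fun m t => min m (pvPrio t)) 15 = pvM tags := rfl
  rw [hM]
  unfold pvToOpt
  by_cases h : pvM tags < 15
  · rw [if_pos h]
  · rw [if_neg h]
    have h1 := pv_foldmin_le_init tags 15
    have h15 : pvM tags = 15 := by unfold pvM; omega
    rw [h15]
    rfl

-- A is its fifteen-condition chain with the rule-hit booleans
theorem pv_A_eq (tags : List String) :
    suggest_board tags = pvChainA (pvHit tags 0) (pvHit tags 1) (pvHit tags 2) (pvHit tags 3)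
      (pvHit tags 4) (pvHit tags 5) (pvHit tags 6) (pvHit tags 7) (pvHit tags 8) (pvHit tags 9)
      (pvHit tags 10) (pvHit tags 11) (pvHit tags 12) (pvHit tags 13) (pvHit tags 14) := by
  have hA : suggest_board tags = pvChainA
      (tags.contains "henna") (tags.contains "desi") (tags.contains "bridal")
      (tags.contains "thrifted") (tags.contains "nails") (tags.contains "outfits")
      (tags.contains "floral") (tags.contains "neutral")
      (!(PySem.Set.inter (PySem.Set.ofList tags) ["mehndi", "henna design", "mehendi"]).isEmpty)
      (!(PySem.Set.inter (PySem.Set.ofList tags) ["wedding", "bride", "bridal mehndi"]).isEmpty)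
      (!(PySem.Set.inter (PySem.Set.ofList tags) ["pakistani", "indian", "south asian", "desi fashion"]).isEmpty)
      (!(PySem.Set.inter (PySem.Set.ofList tags) ["nail art", "manicure", "nails"]).isEmpty)
      (!(PySem.Set.inter (PySem.Set.ofList tags) ["fashion", "style", "clothing", "outfit"]).isEmpty)
      (!(PySem.Set.inter (PySem.Set.ofList tags) ["flowers", "botanical", "floral"]).isEmpty)
      (!(PySem.Set.inter (PySem.Set.ofList tags) ["vintage", "thrift", "secondhand"]).isEmpty) := rfl
  rw [hA,
    show tags.contains "henna" = pvHit tags 0 from by simp [pvHit, pvKws, pvRules, BOARD_CATEGORIES],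
    show tags.contains "desi" = pvHit tags 1 from by simp [pvHit, pvKws, pvRules, BOARD_CATEGORIES],
    show tags.contains "bridal" = pvHit tags 2 from by simp [pvHit, pvKws, pvRules, BOARD_CATEGORIES],
    show tags.contains "thrifted" = pvHit tags 3 from by simp [pvHit, pvKws, pvRules, BOARD_CATEGORIES],
    show tags.contains "nails" = pvHit tags 4 from by simp [pvHit, pvKws, pvRules, BOARD_CATEGORIES],
    show tags.contains "outfits" = pvHit tags 5 from by simp [pvHit, pvKws, pvRules, BOARD_CATEGORIES],
    show tags.contains "floral" = pvHit tags 6 from by simp [pvHit, pvKws, pvRules, BOARD_CATEGORIES],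
    show tags.contains "neutral" = pvHit tags 7 from by simp [pvHit, pvKws, pvRules, BOARD_CATEGORIES],
    show (!(PySem.Set.inter (PySem.Set.ofList tags) ["mehndi", "henna design", "mehendi"]).isEmpty) = pvHit tags 8 from by rw [pv_cond]; rfl,
    show (!(PySem.Set.inter (PySem.Set.ofList tags) ["wedding", "bride", "bridal mehndi"]).isEmpty) = pvHit tags 9 from by rw [pv_cond]; rfl,
    show (!(PySem.Set.inter (PySem.Set.ofList tags) ["pakistani", "indian", "south asian", "desi fashion"]).isEmpty) = pvHit tags 10 from by rw [pv_cond]; rfl,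
    show (!(PySem.Set.inter (PySem.Set.ofList tags) ["nail art", "manicure", "nails"]).isEmpty) = pvHit tags 11 from by rw [pv_cond]; rfl,
    show (!(PySem.Set.inter (PySem.Set.ofList tags) ["fashion", "style", "clothing", "outfit"]).isEmpty) = pvHit tags 12 from by rw [pv_cond]; rfl,
    show (!(PySem.Set.inter (PySem.Set.ofList tags) ["flowers", "botanical", "floral"]).isEmpty) = pvHit tags 13 from by rw [pv_cond]; rfl,
    show (!(PySem.Set.inter (PySem.Set.ofList tags) ["vintage", "thrift", "secondhand"]).isEmpty) = pvHit tags 14 from by rw [pv_cond]; rfl]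

theorem pv_main (tags : List String) : suggest_board tags = suggest_board_alt tags := by
  rw [pv_A_eq, pv_B_eq]
  cases h0 : pvHit tags 0
  · -- rule 0 does not fire
    cases h1 : pvHit tags 1
    · -- rule 1 does not fire
      cases h2 : pvHit tags 2
      · -- rule 2 does not fire
        cases h3 : pvHit tags 3
        · -- rule 3 does not fire
          cases h4 : pvHit tags 4
          · -- rule 4 does not fire
            cases h5 : pvHit tags 5
            · -- rule 5 does not fire
              cases h6 : pvHit tags 6
              · -- rule 6 does not fire
                cases h7 : pvHit tags 7
                · -- rule 7 does not fire
                  cases h8 : pvHit tags 8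
                  · -- rule 8 does not fire
                    cases h9 : pvHit tags 9
                    · -- rule 9 does not fire
                      cases h10 : pvHit tags 10
                      · -- rule 10 does not fire
                        cases h11 : pvHit tags 11
                        · -- rule 11 does not fire
                          cases h12 : pvHit tags 12
                          · -- rule 12 does not fire
                            cases h13 : pvHit tags 13
                            · -- rule 13 does not fire
                              cases h14 : pvHit tags 14
                              · -- rule 14 does not fire
                                rw [pv_M_eq tags 15 (by omega) (by intro k hk; interval_cases k <;> assumption) (fun h => absurd h (by omega))]
                                rfl
                              · -- rule 14 fires first
                                rw [pv_M_eq tags 14 (by omega) (by intro k hk; interval_cases k <;> assumption) (fun _ => h14)]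
                                rfl
                            · -- rule 13 fires first
                              rw [pv_M_eq tags 13 (by omega) (by intro k hk; interval_cases k <;> assumption) (fun _ => h13)]
                              rfl
                          · -- rule 12 fires first
                            rw [pv_M_eq tags 12 (by omega) (by intro k hk; interval_cases k <;> assumption) (fun _ => h12)]
                            rfl
                        · -- rule 11 fires first
                          rw [pv_M_eq tags 11 (by omega) (by intro k hk; interval_cases k <;> assumption) (fun _ => h11)]
                          rfl
                      · -- rule 10 fires first
                        rw [pv_M_eq tags 10 (by omega) (by intro k hk; interval_cases k <;> assumption) (fun _ => h10)]
                        rfl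
                    · -- rule 9 fires first
                      rw [pv_M_eq tags 9 (by omega) (by intro k hk; interval_cases k <;> assumption) (fun _ => h9)]
                      rfl
                  · -- rule 8 fires first
                    rw [pv_M_eq tags 8 (by omega) (by intro k hk; interval_cases k <;> assumption) (fun _ => h8)]
                    rfl
                · -- rule 7 fires first
                  rw [pv_M_eq tags 7 (by omega) (by intro k hk; interval_cases k <;> assumption) (fun _ => h7)]
                  rfl
              · -- rule 6 fires first
                rw [pv_M_eq tags 6 (by omega) (by intro k hk; interval_cases k <;> assumption) (fun _ => h6)]
                rfl
            · -- rule 5 fires first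
              rw [pv_M_eq tags 5 (by omega) (by intro k hk; interval_cases k <;> assumption) (fun _ => h5)]
              rfl
          · -- rule 4 fires first
            rw [pv_M_eq tags 4 (by omega) (by intro k hk; interval_cases k <;> assumption) (fun _ => h4)]
            rfl
        · -- rule 3 fires first
          rw [pv_M_eq tags 3 (by omega) (by intro k hk; interval_cases k <;> assumption) (fun _ => h3)]
          rfl
      · -- rule 2 fires first
        rw [pv_M_eq tags 2 (by omega) (by intro k hk; interval_cases k <;> assumption) (fun _ => h2)]
        rfl
    · -- rule 1 fires first
      rw [pv_M_eq tags 1 (by omega) (by intro k hk; interval_cases k <;> assumption) (fun _ => h1)]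
      rfl
  · -- rule 0 fires first
    rw [pv_M_eq tags 0 (by omega) (by intro k hk; exact absurd hk (by omega)) (fun _ => h0)]
    rfl

-- ===== VERDICT (by name: the statement is the Claim_ definition above) =====
theorem suggest_board_spec : Claim_equal_suggest_board := fun tags _ => pv_main tags
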